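-- pv_equiv track=rewrite | github.com/paumurl/biopython_gbk_parser | biopython_gbk_parser.py | get_genomic_neighbourhood_list
-- ===== SOURCE A (Python) =====
-- def get_genomic_neighbourhood_list(locus_tag,list_of_genes):
--
-- 	"""
-- 	Con esta funcion obtenemos los locus_tags de los genes
-- 	que estan en la posicion -2,-1,+1 y +2 alrededor del
-- 	gen (locus_tag) que usamos como query
--
-- 	"""
-- 	#primero identificamos el indice del locus para encontrar sus vecinos
-- 	indice_locus=list_of_genes.index(locus_tag)
-- 	indices=[-2,-1,0,+1,+2] #indices de los vecino y el locus de input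
-- 	genomic_neighbourhood_list=[]
--
-- 	#si el locus es el primer o segundo elemento de la lista
-- 	#entonces cogemos una sublista de indices para que no nos de
-- 	#genes del final de la lista como proximos, en caso de que interese
-- 	#(p.ej genoma circular) quitar condicional y descomentar el trozo
-- 	#de código dentro del except
-- 	if indice_locus==0:
-- 		indices=indices[2::]
-- 	elif indice_locus==1:
-- 		indices=indices[1::]
--
-- 	#cogemos los indices vecinos de nuestro locus de nuestra lista de genes
-- 	#obtenemos una lista de genes vecinos que nos interesan
-- 	for i in indices:
-- 		try:
-- 			new_indice=indice_locus+i
-- 			genomic_neighbourhood_list.append(list_of_genes[new_indice])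
-- 		except:
-- 			pass
-- 			#en caso de querer que si damos un locus penultimo o ultimo
-- 			#nos de los valores iniciales de la lista como próximos comentar
-- 			#el condicional anterior y descomentar lo siguiente:
-- 			#if list_of_genes[indice_locus]==list_of_genes[-1]:
-- 			#	genomic_neighbourhood_list.append(list_of_genes[0])
-- 			#	genomic_neighbourhood_list.append(list_of_genes[1])
-- 			#	break
--
-- 			#elif list_of_genes[indice_locus]==list_of_genes[-2]:
-- 			#	genomic_neighbourhood_list.append(list_of_genes[0])
--
-- 	return genomic_neighbourhood_list
-- ===== SOURCE B (Python) =====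
-- def get_genomic_neighbourhood_list(locus_tag, list_of_genes):
--     idx = list_of_genes.index(locus_tag)
--     return list_of_genes[max(0, idx - 2): idx + 3]
-- ===== Notes on version B (the rewrite author's own statement) =====
-- stated objective: simpler
-- what changed: Replaced the index-offset loop with per-element try/except and the index-0/1 special cases by a single clamped slice list_of_genes[max(0, idx-2): idx+3].
import Mathlib
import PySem

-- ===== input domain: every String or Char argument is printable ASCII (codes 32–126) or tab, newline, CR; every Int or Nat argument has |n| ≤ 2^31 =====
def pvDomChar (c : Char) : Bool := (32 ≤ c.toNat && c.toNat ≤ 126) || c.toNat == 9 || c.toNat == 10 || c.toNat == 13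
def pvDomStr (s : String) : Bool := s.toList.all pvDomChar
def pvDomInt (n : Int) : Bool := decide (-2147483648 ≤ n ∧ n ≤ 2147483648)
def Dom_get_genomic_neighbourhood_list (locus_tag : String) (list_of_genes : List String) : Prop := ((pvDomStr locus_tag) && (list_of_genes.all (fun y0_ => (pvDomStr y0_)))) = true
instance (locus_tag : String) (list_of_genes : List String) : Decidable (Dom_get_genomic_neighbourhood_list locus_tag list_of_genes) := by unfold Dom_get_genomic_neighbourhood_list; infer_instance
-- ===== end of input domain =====

-- B replaces A's per-offset loop with try/except and index-0/1 special cases by one clamped slice (objective: simpler).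

-- ===== PORT A =====
def get_genomic_neighbourhood_list (locus_tag : String) (list_of_genes : List String) : List String :=
  match PySem.List.index? list_of_genes locus_tag with
  | none => []   -- Python raises ValueError here; excluded by Pre_
  | some indice_locus =>
    let indices : List Int := [-2, -1, 0, 1, 2]
    let indices :=
      if indice_locus = 0 then PySem.List.slice indices (some 2) none
      else if indice_locus = 1 then PySem.List.slice indices (some 1) none
      else indices
    indices.foldl (fun acc i =>
      match PySem.List.pyGet? list_of_genes ((indice_locus : Int) + i) with
      | some g => acc ++ [g]
      | none => acc) []

-- ===== PORT B =====
def get_genomic_neighbourhood_list_alt (locus_tag : String) (list_of_genes : List String) : List String :=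
  match PySem.List.index? list_of_genes locus_tag with
  | none => []   -- Python raises ValueError here; excluded by Pre_
  | some idx =>
    PySem.List.slice list_of_genes (some (max 0 ((idx : Int) - 2))) (some ((idx : Int) + 3))

-- ===== PRECONDITION & SPEC =====
-- Pre_ excludes exactly the inputs where list_of_genes.index(locus_tag) raises ValueError (tag absent).
def Pre_get_genomic_neighbourhood_list (locus_tag : String) (list_of_genes : List String) : Prop :=
  locus_tag ∈ list_of_genes
instance (locus_tag : String) (list_of_genes : List String) : Decidable (Pre_get_genomic_neighbourhood_list locus_tag list_of_genes) := by unfold Pre_get_genomic_neighbourhood_list; infer_instance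

def pvWitness_get_genomic_neighbourhood_list : String × List String :=
  ("b", ["a", "b", "c", "d"])

def Spec_get_genomic_neighbourhood_list (locus_tag : String) (list_of_genes : List String) (out : List String) : Prop := out = get_genomic_neighbourhood_list_alt locus_tag list_of_genes
instance (locus_tag : String) (list_of_genes : List String) (out : List String) : Decidable (Spec_get_genomic_neighbourhood_list locus_tag list_of_genes out) := by unfold Spec_get_genomic_neighbourhood_list; infer_instance

-- ===== CLAIM (what is proved, stated in full; the proofs are below) =====
def Claim_equal_get_genomic_neighbourhood_list : Prop := ∀ (locus_tag : String) (list_of_genes : List String), Dom_get_genomic_neighbourhood_list locus_tag list_of_genes → Pre_get_genomic_neighbourhood_list locus_tag list_of_genes → Spec_get_genomic_neighbourhood_list locus_tag list_of_genes (get_genomic_neighbourhood_list locus_tag list_of_genes)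

-- ===== LEMMAS AND PROOFS =====

-- one loop step of A appends the optional element
lemma pv_step (xs : List String) (j : Nat) (acc : List String) :
    (match PySem.List.pyGet? xs ((j : Nat) : Int) with
      | some g => acc ++ [g]
      | none => acc) = acc ++ (xs[j]?).toList := by
  rw [PySem.List.pyGet?_natCast]
  cases h : xs[j]? <;> simp

-- a window of five consecutive optional lookups is a drop-take
lemma pv_window5 (xs : List String) (a : Nat) :
    (xs[a]?).toList ++ (xs[a+1]?).toList ++ (xs[a+2]?).toList ++ (xs[a+3]?).toList ++ (xs[a+4]?).toList
      = (xs.drop a).take 5 := by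
  have h : ∀ j : Nat, xs[a+j]? = (xs.drop a)[j]? := by
    intro j; rw [List.getElem?_drop]
  have h0 : xs[a]? = (xs.drop a)[0]? := by have := h 0; simpa using this
  rw [h0, h 1, h 2, h 3, h 4]
  rw [show (5:Nat) = 4+1 from rfl, List.take_add_one,
      show (4:Nat) = 3+1 from rfl, List.take_add_one,
      show (3:Nat) = 2+1 from rfl, List.take_add_one,
      show (2:Nat) = 1+1 from rfl, List.take_add_one,
      show (1:Nat) = 0+1 from rfl, List.take_add_one]
  simp

lemma pv_window4 (xs : List String) :
    (xs[0]?).toList ++ (xs[1]?).toList ++ (xs[2]?).toList ++ (xs[3]?).toList = xs.take 4 := by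
  rw [show (4:Nat) = 3+1 from rfl, List.take_add_one,
      show (3:Nat) = 2+1 from rfl, List.take_add_one,
      show (2:Nat) = 1+1 from rfl, List.take_add_one,
      show (1:Nat) = 0+1 from rfl, List.take_add_one]
  simp

lemma pv_window3 (xs : List String) :
    (xs[0]?).toList ++ (xs[1]?).toList ++ (xs[2]?).toList = xs.take 3 := by
  rw [show (3:Nat) = 2+1 from rfl, List.take_add_one,
      show (2:Nat) = 1+1 from rfl, List.take_add_one,
      show (1:Nat) = 0+1 from rfl, List.take_add_one]
  simp

-- ===== VERDICT (by name: the statement is the Claim_ definition above) =====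
theorem get_genomic_neighbourhood_list_spec : Claim_equal_get_genomic_neighbourhood_list := by
  intro locus_tag xs _ hpre
  unfold Spec_get_genomic_neighbourhood_list
  unfold get_genomic_neighbourhood_list get_genomic_neighbourhood_list_alt
  obtain ⟨n, hn⟩ := (PySem.List.index?_isSome_iff (xs := xs) (v := locus_tag)).2 hpre
    |> fun h => Option.isSome_iff_exists.mp h
  rw [hn]
  simp only []
  rcases Nat.lt_or_ge n 2 with h2 | h2
  · interval_cases n
    · -- n = 0
      rw [show PySem.List.slice ([-2,-1,0,1,2] : List Int) (some 2) none = ([0,1,2] : List Int) from rfl]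
      simp only [reduceIte, List.foldl_cons, List.foldl_nil]
      rw [show ((0:Nat):Int) + (0:Int) = ((0:Nat):Int) from by norm_num,
          show ((0:Nat):Int) + (1:Int) = ((1:Nat):Int) from by norm_num,
          show ((0:Nat):Int) + (2:Int) = ((2:Nat):Int) from by norm_num]
      rw [pv_step, pv_step, pv_step]
      rw [show max 0 (((0:Nat):Int) - 2) = ((0:Nat):Int) from by norm_num,
          show ((0:Nat):Int) + 3 = ((3:Nat):Int) from by norm_num,
          PySem.List.slice_natCast]
      rw [show (3:Nat)-0 = 3 from rfl]
      simp only [List.drop_zero, List.nil_append]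
      exact pv_window3 xs
    · -- n = 1
      rw [show PySem.List.slice ([-2,-1,0,1,2] : List Int) (some 1) none = ([-1,0,1,2] : List Int) from rfl,
          if_neg (by norm_num : ¬ (1:Nat) = 0)]
      simp only [reduceIte, List.foldl_cons, List.foldl_nil]
      rw [show ((1:Nat):Int) + (-1:Int) = ((0:Nat):Int) from by norm_num,
          show ((1:Nat):Int) + (0:Int) = ((1:Nat):Int) from by norm_num,
          show ((1:Nat):Int) + (1:Int) = ((2:Nat):Int) from by norm_num,
          show ((1:Nat):Int) + (2:Int) = ((3:Nat):Int) from by norm_num]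
      rw [pv_step, pv_step, pv_step, pv_step]
      rw [show max 0 (((1:Nat):Int) - 2) = ((0:Nat):Int) from by norm_num,
          show ((1:Nat):Int) + 3 = ((4:Nat):Int) from by norm_num,
          PySem.List.slice_natCast]
      rw [show (4:Nat)-0 = 4 from rfl]
      simp only [List.drop_zero, List.nil_append]
      exact pv_window4 xs
  · -- n ≥ 2
    obtain ⟨a, rfl⟩ : ∃ a : Nat, n = a + 2 := ⟨n - 2, by omega⟩
    rw [if_neg (by omega), if_neg (by omega)]
    simp only [List.foldl_cons, List.foldl_nil]
    rw [show (((a+2:Nat)):Int) + (-2:Int) = ((a:Nat):Int) from by push_cast; ring,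
        show (((a+2:Nat)):Int) + (-1:Int) = ((a+1:Nat):Int) from by push_cast; ring,
        show (((a+2:Nat)):Int) + (0:Int) = ((a+2:Nat):Int) from by push_cast; ring,
        show (((a+2:Nat)):Int) + (1:Int) = ((a+3:Nat):Int) from by push_cast; ring,
        show (((a+2:Nat)):Int) + (2:Int) = ((a+4:Nat):Int) from by push_cast; ring]
    rw [pv_step, pv_step, pv_step, pv_step, pv_step]
    rw [show max 0 ((((a+2:Nat)):Int) - 2) = ((a:Nat):Int) from by push_cast; omega,
        show (((a+2:Nat)):Int) + 3 = ((a+5:Nat):Int) from by push_cast; ring,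
        PySem.List.slice_natCast]
    rw [show a+5-a = 5 from by omega]
    simp only [List.nil_append]
    exact pv_window5 xs a
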